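-- pv_equiv track=rewrite | github.com/Exo1i/Tactic-SW | backend/games/rubiks_cube_game.py | _simplify_cube_moves_basic
-- ===== SOURCE A (Python) =====
-- def _simplify_cube_moves_basic(moves_str: str) -> str:
--     moves = [m for m in moves_str.strip().split() if m]
--     if not moves: return ""
--
--     simplified_pass1 = []
--     i = 0
--     while i < len(moves):
--         current_move_full = moves[i]
--         face = current_move_full[0]
--
--         if face not in ['F', 'B', 'R', 'L', 'D', 'U']:
--             simplified_pass1.append(current_move_full)
--             i += 1
--             continue
--
--         net_rot = 0
--         j = i
--         while j < len(moves):
--             m_full = moves[j]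
--             if not m_full or m_full[0] != face:
--                 break
--
--             val = 1
--             if len(m_full) > 1:
--                 if m_full[1] == '2': val = 2
--                 elif m_full[1] == "'": val = 3
--             net_rot = (net_rot + val) % 4
--             j += 1
--
--         if net_rot == 1: simplified_pass1.append(face)
--         elif net_rot == 2: simplified_pass1.append(face + "2")
--         elif net_rot == 3: simplified_pass1.append(face + "'")
--         i = j
--
--     return " ".join(simplified_pass1)
-- ===== SOURCE B (Python) =====
-- def _simplify_cube_moves_basic(moves_str: str) -> str:
--     out = []          # rendered output tokens
--     cur = None        # open run: (face, net rotation mod 4), not yet rendered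
--     def flush():
--         nonlocal cur
--         if cur is not None:
--             face, rot = cur
--             if rot:
--                 out.append(face + ("", "2", "'")[rot - 1])
--             cur = None
--     for tok in moves_str.strip().split():
--         face = tok[0]
--         if face in "FBRLDU":
--             val = 1
--             if len(tok) > 1:
--                 if tok[1] == '2':
--                     val = 2
--                 elif tok[1] == "'":
--                     val = 3
--             if cur is not None and cur[0] == face:
--                 cur = (face, (cur[1] + val) % 4)
--             else:
--                 flush()
--                 cur = (face, val)
--         else:
--             flush()
--             out.append(tok)
--     flush()
--     return " ".join(out)
-- ===== Notes on version B (the rewrite author's own statement) =====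
-- stated objective: alternative
-- what changed: Replaces A's nested while-loops (outer index loop plus inner scan that re-reads the run of same-face tokens) with a single left fold over the tokens carrying an open (face, net-rotation mod 4) run that is flushed when the face changes, a non-face token arrives, or the input ends.
import Mathlib
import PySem

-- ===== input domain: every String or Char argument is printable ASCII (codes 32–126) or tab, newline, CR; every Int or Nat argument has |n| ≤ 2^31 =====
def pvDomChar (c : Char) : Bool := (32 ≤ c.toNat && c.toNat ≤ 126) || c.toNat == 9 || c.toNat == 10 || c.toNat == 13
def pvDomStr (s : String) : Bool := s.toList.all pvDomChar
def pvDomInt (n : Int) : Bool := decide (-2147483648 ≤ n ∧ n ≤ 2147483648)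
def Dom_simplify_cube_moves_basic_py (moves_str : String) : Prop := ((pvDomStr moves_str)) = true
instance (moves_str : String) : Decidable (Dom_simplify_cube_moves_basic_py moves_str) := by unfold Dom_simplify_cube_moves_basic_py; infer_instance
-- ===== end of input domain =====

-- B replaces A's nested run-grouping loop by a single left fold carrying an open (face, net-rotation) run; same return value (objective: alternative decomposition).

-- ===== PORT A =====
-- A works over the whitespace-split tokens; tokens are kept as List Char.
def pvFacesA : List Char := ['F', 'B', 'R', 'L', 'D', 'U']

-- val = 1; if len > 1: '2' -> 2, "'" -> 3
def pvValA (cs : List Char) : Int :=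
  match cs with
  | _ :: c :: _ => if c = '2' then 2 else if c = '\'' then 3 else 1
  | _ => 1

-- inner while-loop: consume the run of tokens whose first char is `face`, accumulating net_rot
def pvInnerA (face : Char) : List (List Char) → Int → Int × List (List Char)
  | [], net => (net, [])
  | m :: tl, net =>
    -- `if not m_full or m_full[0] != face: break`, i.e. continue iff head is `face`
    if m.head? = some face then pvInnerA face tl (PySem.Int.mod (net + pvValA m) 4)
    else (net, m :: tl)

def pvRenderA (face : Char) (net : Int) : List (List Char) :=
  if net = 1 then [[face]]
  else if net = 2 then [[face, '2']]
  else if net = 3 then [[face, '\'']]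
  else []

theorem pvInnerA_len (face : Char) (ts : List (List Char)) (net : Int) :
    (pvInnerA face ts net).2.length ≤ ts.length := by
  induction ts generalizing net with
  | nil => simp [pvInnerA]
  | cons m tl ih =>
    simp only [pvInnerA]
    split
    · exact le_trans (ih _) (Nat.le_succ _)
    · simp

-- outer while-loop; the run starting at token m begins with m itself (whose first char IS
-- `face`, so the inner loop's first iteration never breaks): that first iteration is the
-- initial net (0 + val) % 4, then pvInnerA continues on the tail.
def pvOuterA : List (List Char) → List (List Char)
  | [] => []
  | m :: tl =>
    -- m ≠ [] here (A filters empty tokens), so `headD ' '` is m[0]; ' ' is unreachable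
    if (m.headD ' ') ∈ pvFacesA then
      pvRenderA (m.headD ' ') (pvInnerA (m.headD ' ') tl (PySem.Int.mod (0 + pvValA m) 4)).1
        ++ pvOuterA (pvInnerA (m.headD ' ') tl (PySem.Int.mod (0 + pvValA m) 4)).2
    else m :: pvOuterA tl
  termination_by ts => ts.length
  decreasing_by
    · have h := pvInnerA_len (m.headD ' ') tl (PySem.Int.mod (0 + pvValA m) 4)
      simp only [List.length_cons]
      omega
    · simp

def simplify_cube_moves_basic_py (moves_str : String) : String :=
  -- moves = [m for m in moves_str.strip().split() if m]
  let moves := (PySem.Chars.split₀ (PySem.Chars.strip moves_str.toList)).filter (fun m => !m.isEmpty)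
  if moves.isEmpty then ""
  else String.ofList (PySem.Chars.join [' '] (pvOuterA moves))

-- ===== PORT B =====
def pvFacesB : List Char := ['F', 'B', 'R', 'L', 'D', 'U']   -- Source B: face in "FBRLDU"

def pvValB (cs : List Char) : Int :=
  match cs with
  | _ :: c :: _ => if c = '2' then 2 else if c = '\'' then 3 else 1
  | _ => 1

-- flush(): render the open run, if any; rot is always 0..3, the tuple index ("","2","'")[rot-1]
def pvFlushB : Option (Char × Int) → List (List Char)
  | none => []
  | some (face, rot) =>
    if rot = 0 then []
    else [face :: (if rot = 1 then [] else if rot = 2 then ['2'] else ['\''])]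

-- one iteration of Source B's for-loop; state = (out, cur)
def pvStepB (st : List (List Char) × Option (Char × Int)) (tok : List Char) :
    List (List Char) × Option (Char × Int) :=
  -- tok ≠ [] (tokens come from split()), so `headD ' '` is tok[0]; ' ' is unreachable
  if (tok.headD ' ') ∈ pvFacesB then
    match st.2 with
    | some (cf, cr) =>
      if cf = tok.headD ' ' then (st.1, some (cf, PySem.Int.mod (cr + pvValB tok) 4))
      else (st.1 ++ pvFlushB (some (cf, cr)), some (tok.headD ' ', pvValB tok))
    | none => (st.1, some (tok.headD ' ', pvValB tok))
  else (st.1 ++ pvFlushB st.2 ++ [tok], none)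

-- final flush after the loop
def pvFinishB (st : List (List Char) × Option (Char × Int)) : List (List Char) :=
  st.1 ++ pvFlushB st.2

def simplify_cube_moves_basic_py_alt (moves_str : String) : String :=
  let st := (PySem.Chars.split₀ (PySem.Chars.strip moves_str.toList)).foldl pvStepB ([], none)
  String.ofList (PySem.Chars.join [' '] (pvFinishB st))

-- ===== PRECONDITION & SPEC =====
def Spec_simplify_cube_moves_basic_py (moves_str : String) (out : String) : Prop := out = simplify_cube_moves_basic_py_alt moves_str
instance (moves_str : String) (out : String) : Decidable (Spec_simplify_cube_moves_basic_py moves_str out) := by unfold Spec_simplify_cube_moves_basic_py; infer_instance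

-- ===== CLAIM (what is proved, stated in full; the proofs are below) =====
def Claim_equal_simplify_cube_moves_basic_py : Prop := ∀ (moves_str : String), Dom_simplify_cube_moves_basic_py moves_str → Spec_simplify_cube_moves_basic_py moves_str (simplify_cube_moves_basic_py moves_str)

-- ===== LEMMAS AND PROOFS =====

theorem pvVal_eq (cs : List Char) : pvValB cs = pvValA cs := rfl

theorem pvVal_range (cs : List Char) : pvValA cs = 1 ∨ pvValA cs = 2 ∨ pvValA cs = 3 := by
  match cs with
  | [] => left; rfl
  | [_] => left; rfl
  | _ :: c :: _ =>
    simp only [pvValA]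
    split_ifs <;> simp

theorem pvMod4_emod (x : Int) : PySem.Int.mod x 4 = x % 4 := by
  unfold PySem.Int.mod
  rw [Int.fmod_eq_emod]
  simp

theorem pvMod4_range (x : Int) : 0 ≤ PySem.Int.mod x 4 ∧ PySem.Int.mod x 4 < 4 := by
  rw [pvMod4_emod]
  exact ⟨Int.emod_nonneg x (by norm_num), Int.emod_lt_of_pos x (by norm_num)⟩

theorem pvMod4_small (x : Int) (h0 : 0 ≤ x) (h4 : x < 4) : PySem.Int.mod x 4 = x := by
  rw [pvMod4_emod]
  exact Int.emod_eq_of_lt h0 h4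

theorem pvOuterA_nil : pvOuterA [] = [] := by rw [pvOuterA]

theorem pvOuterA_cons (m : List Char) (tl : List (List Char)) :
    pvOuterA (m :: tl) =
      if (m.headD ' ') ∈ pvFacesA then
        pvRenderA (m.headD ' ') (pvInnerA (m.headD ' ') tl (PySem.Int.mod (0 + pvValA m) 4)).1
          ++ pvOuterA (pvInnerA (m.headD ' ') tl (PySem.Int.mod (0 + pvValA m) 4)).2
      else m :: pvOuterA tl := by rw [pvOuterA]

-- with rot in range, Source B's flush renders exactly what A renders
theorem pvFlush_eq_render (f : Char) (r : Int) (h0 : 0 ≤ r) (h4 : r < 4) :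
    pvFlushB (some (f, r)) = pvRenderA f r := by
  have : r = 0 ∨ r = 1 ∨ r = 2 ∨ r = 3 := by omega
  rcases this with h | h | h | h <;> subst h <;> rfl

theorem pvInnerA_mem (face : Char) (ts : List (List Char)) (net : Int) :
    ∀ t ∈ (pvInnerA face ts net).2, t ∈ ts := by
  induction ts generalizing net with
  | nil => simp [pvInnerA]
  | cons m tl ih =>
    simp only [pvInnerA]
    split
    · intro t ht; exact List.mem_cons_of_mem _ (ih _ t ht)
    · intro t ht; exact ht

-- KEY LEMMA 1: while the open run has face f, B's fold tracks A's inner loop exactly: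
-- folding from state (out, some (f, r)) equals rendering the run's net rotation and
-- continuing from a closed state on the tokens after the run.
theorem pvRunLemma (f : Char) (hf : f ∈ pvFacesB) :
    ∀ (ts : List (List Char)) (out : List (List Char)) (r : Int), 0 ≤ r → r < 4 →
    pvFinishB (ts.foldl pvStepB (out, some (f, r))) =
      pvFinishB ((pvInnerA f ts r).2.foldl pvStepB (out ++ pvRenderA f (pvInnerA f ts r).1, none)) := by
  intro ts
  induction ts with
  | nil =>
    intro out r h0 h4
    simp only [pvInnerA, List.foldl_nil, pvFinishB]
    rw [pvFlush_eq_render f r h0 h4]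
    simp [pvFlushB]
  | cons m tl ih =>
    intro out r h0 h4
    by_cases hm : m.head? = some f
    · -- m continues the run: both sides absorb m into the net rotation
      have hhd : m.headD ' ' = f := by
        cases m with
        | nil => simp at hm
        | cons c cs => simp_all
      simp only [pvInnerA, hm, List.foldl_cons]
      have hstep : pvStepB (out, some (f, r)) m = (out, some (f, PySem.Int.mod (r + pvValB m) 4)) := by
        simp [pvStepB, hm, hf]
      rw [hstep, pvVal_eq]
      exact ih out _ (pvMod4_range _).1 (pvMod4_range _).2
    · -- m breaks the run: the inner loop stops here; B's step flushes the open run first,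
      -- which is exactly starting from (out ++ render, none)
      have hinner : pvInnerA f (m :: tl) r = (r, m :: tl) := by
        simp [pvInnerA, hm]
      rw [hinner]
      simp only [List.foldl_cons]
      have hstep : pvStepB (out, some (f, r)) m = pvStepB (out ++ pvRenderA f r, none) m := by
        rw [← pvFlush_eq_render f r h0 h4]
        cases m with
        | nil =>
          -- empty token: headD = ' ', not a face
          simp [pvStepB, pvFacesB, pvFlushB, List.append_assoc]
        | cons c cs =>
          have hcf : c ≠ f := by intro h; apply hm; simp [h]
          by_cases hc : c ∈ pvFacesB
          · simp [pvStepB, hc, Ne.symm hcf]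
          · simp [pvStepB, hc, pvFlushB, List.append_assoc]
      rw [hstep]

-- KEY LEMMA 2: on any list of nonempty tokens, B's fold from a closed state produces
-- exactly A's outer-loop output (appended to what was already emitted).
theorem pvMainLemma :
    ∀ (n : Nat) (ts : List (List Char)), ts.length ≤ n → (∀ t ∈ ts, t ≠ []) →
    ∀ out, pvFinishB (ts.foldl pvStepB (out, none)) = out ++ pvOuterA ts := by
  intro n
  induction n with
  | zero =>
    intro ts hlen _ out
    have : ts = [] := List.length_eq_zero_iff.mp (Nat.le_zero.mp hlen)
    subst this
    simp [pvFinishB, pvFlushB, pvOuterA_nil]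
  | succ n ih =>
    intro ts hlen hne out
    cases ts with
    | nil => simp [pvFinishB, pvFlushB, pvOuterA_nil]
    | cons m tl =>
      have hm : m ≠ [] := hne m (List.mem_cons_self)
      by_cases hface : (m.headD ' ') ∈ pvFacesA
      · -- face token: B opens a run with rot = val; A's initial net is (0 + val) % 4 = val
        have hv : pvValA m = 1 ∨ pvValA m = 2 ∨ pvValA m = 3 := pvVal_range m
        have hv0 : 0 ≤ pvValA m := by rcases hv with h | h | h <;> omega
        have hv4 : pvValA m < 4 := by rcases hv with h | h | h <;> omega
        have hmod : PySem.Int.mod (0 + pvValA m) 4 = pvValA m := by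
          rw [zero_add]; exact pvMod4_small _ hv0 hv4
        have hstep : pvStepB (out, none) m = (out, some (m.headD ' ', pvValA m)) := by
          simp [pvStepB, pvFacesB, pvFacesA] at *
          simp [hface, pvVal_eq]
        have hhd : m.head? = some (m.headD ' ') := by
          cases m with
          | nil => exact absurd rfl hm
          | cons c cs => rfl
        simp only [List.foldl_cons, hstep]
        rw [pvRunLemma (m.headD ' ') hface tl out (pvValA m) hv0 hv4]
        have hlen2 : (pvInnerA (m.headD ' ') tl (pvValA m)).2.length ≤ n := by
          have := pvInnerA_len (m.headD ' ') tl (pvValA m)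
          simp only [List.length_cons] at hlen; omega
        have hne2 : ∀ t ∈ (pvInnerA (m.headD ' ') tl (pvValA m)).2, t ≠ [] := by
          intro t ht
          exact hne t (List.mem_cons_of_mem _ (pvInnerA_mem _ _ _ t ht))
        rw [ih _ hlen2 hne2]
        rw [pvOuterA_cons, if_pos hface, hmod, List.append_assoc]
      · -- non-face token: B flushes (nothing open) and emits the token as-is
        have hstep : pvStepB (out, none) m = (out ++ [m], none) := by
          simp [pvStepB, pvFacesB, pvFacesA] at *
          simp [hface, pvFlushB]
        simp only [List.foldl_cons, hstep]
        have hlen2 : tl.length ≤ n := by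
          simp only [List.length_cons] at hlen; omega
        rw [ih tl hlen2 (fun t ht => hne t (List.mem_cons_of_mem _ ht))]
        rw [pvOuterA_cons, if_neg hface]
        simp

-- tokens produced by split() are never empty
theorem pvSplitGo_ne_nil :
    ∀ (s cur : List Char) (acc : List (List Char)), (∀ t ∈ acc, t ≠ []) →
    ∀ t ∈ PySem.Chars.split₀.go s cur acc, t ≠ [] := by
  intro s
  induction s with
  | nil =>
    intro cur acc hacc t ht
    simp only [PySem.Chars.split₀.go] at ht
    split at ht
    · exact hacc t (List.mem_reverse.mp ht)
    · rename_i hcur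
      rcases List.mem_cons.mp (List.mem_reverse.mp ht) with h | h
      · subst h
        intro hh
        exact hcur (by simpa using congrArg List.isEmpty hh)
      · exact hacc t h
  | cons c rest ih =>
    intro cur acc hacc t ht
    simp only [PySem.Chars.split₀.go] at ht
    split at ht
    · split at ht
      · exact ih [] acc hacc t ht
      · rename_i hcur
        refine ih [] (cur.reverse :: acc) ?_ t ht
        intro u hu
        rcases List.mem_cons.mp hu with h | h
        · subst h
          intro hh
          exact hcur (by simpa using congrArg List.isEmpty hh)
        · exact hacc u h
    · exact ih (c :: cur) acc hacc t ht

theorem pvSplit_ne_nil (cs : List Char) : ∀ t ∈ PySem.Chars.split₀ cs, t ≠ [] := by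
  intro t ht
  exact pvSplitGo_ne_nil cs [] [] (by simp) t ht

-- ===== VERDICT (by name: the statement is the Claim_ definition above) =====
theorem simplify_cube_moves_basic_py_spec : Claim_equal_simplify_cube_moves_basic_py := by
  intro s _
  unfold Spec_simplify_cube_moves_basic_py
  unfold simplify_cube_moves_basic_py simplify_cube_moves_basic_py_alt
  have hne := pvSplit_ne_nil (PySem.Chars.strip s.toList)
  set ts := PySem.Chars.split₀ (PySem.Chars.strip s.toList) with hts
  have hfilter : ts.filter (fun m => !m.isEmpty) = ts := by
    apply List.filter_eq_self.mpr
    intro t ht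
    simp [hne t ht]
  simp only [hfilter]
  rw [pvMainLemma ts.length ts le_rfl hne []]
  by_cases h : ts.isEmpty
  · have h2 : ts = [] := List.isEmpty_iff.mp h
    rw [if_pos h, h2]
    simp only [pvOuterA_nil, PySem.Chars.join]
    rfl
  · simp [h]
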